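-- pv_equiv track=rewrite | github.com/walidabdelazizali/NGI_SALES_ASSISTANCE_MICRO_V1 | src/training_router.py | _prefer_exact
-- ===== SOURCE A (Python) =====
-- def _prefer_exact(query, candidates, field):
--     q = query.lower().strip()
--     for c in candidates:
--         if c.get(field, "").lower().strip() == q:
--             return c
--     # fallback: best token overlap
--     best = None
--     best_score = 0
--     q_tokens = set(q.split())
--     for c in candidates:
--         text = c.get(field, "").lower()
--         score = len(q_tokens & set(text.split()))
--         if score > best_score:
--             best = c
--             best_score = score
--     return best
-- ===== SOURCE B (Python) =====
-- def _prefer_exact(query, candidates, field):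
--     q = query.lower().strip()
--     q_tokens = set(q.split())
--     best = None
--     best_score = 0
--     for c in candidates:
--         text = c.get(field, "").lower()
--         if text.strip() == q:
--             return c
--         score = len(q_tokens & set(text.split()))
--         if score > best_score:
--             best, best_score = c, score
--     return best
-- ===== Notes on version B (the rewrite author's own statement) =====
-- stated objective: alternative
-- what changed: Fuses A's two sequential scans (exact-match scan, then token-overlap scan) into one single pass that early-returns on an exact match and otherwise maintains best/best_score, computing each candidate's lowered field value once instead of twice.
import Mathlib
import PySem

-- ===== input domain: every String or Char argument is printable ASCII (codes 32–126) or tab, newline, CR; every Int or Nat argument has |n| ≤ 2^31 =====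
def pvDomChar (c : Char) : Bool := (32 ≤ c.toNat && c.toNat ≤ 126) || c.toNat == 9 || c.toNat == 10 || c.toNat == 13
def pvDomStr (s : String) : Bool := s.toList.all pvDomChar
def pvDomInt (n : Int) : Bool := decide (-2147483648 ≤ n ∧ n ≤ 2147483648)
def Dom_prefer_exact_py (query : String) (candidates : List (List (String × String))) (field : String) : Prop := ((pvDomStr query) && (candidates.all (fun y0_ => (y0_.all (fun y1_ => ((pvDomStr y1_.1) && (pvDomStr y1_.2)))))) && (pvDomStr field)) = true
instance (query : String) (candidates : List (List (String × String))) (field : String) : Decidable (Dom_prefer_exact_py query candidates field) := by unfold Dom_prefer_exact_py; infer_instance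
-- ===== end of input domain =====

-- B fuses A's two sequential scans into a single pass (early return on exact match,
-- otherwise maintain best/best_score); same values, different decomposition.

-- shared helper: c.get(field, "")  (first-match association-list lookup, as Python dict.get)
def pvGetField (c : List (String × String)) (field : String) : String :=
  (PySem.Dict.mk c).getD field ""

-- ===== PORT A =====
-- first loop of A: return the first candidate whose field value lowered+stripped equals q
def pyAexact (q : String) (field : String) : List (List (String × String)) → Option (List (String × String))
  | [] => none
  | c :: rest =>
    if PySem.Str.strip (PySem.Str.lower (pvGetField c field)) = q then some c
    else pyAexact q field rest

-- body of A's second loop (state = (best, best_score))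
def pyAstep (qtok : PySem.Set String) (field : String)
    (st : Option (List (String × String)) × Int) (c : List (String × String)) :
    Option (List (String × String)) × Int :=
  let text := PySem.Str.lower (pvGetField c field)
  let score := PySem.Set.len (PySem.Set.inter qtok (PySem.Set.ofList (PySem.Str.split₀ text)))
  if score > st.2 then (some c, score) else st

def prefer_exact_py (query : String) (candidates : List (List (String × String))) (field : String) : Option (List (String × String)) :=
  let q := PySem.Str.strip (PySem.Str.lower query)
  match pyAexact q field candidates with
  | some c => some c
  | none =>
    let qtok := PySem.Set.ofList (PySem.Str.split₀ q)
    (candidates.foldl (pyAstep qtok field) (none, 0)).1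

-- ===== PORT B =====
-- B's single fused loop: early return on exact match, else update best/best_score
def pyBloop (q : String) (qtok : PySem.Set String) (field : String) :
    List (List (String × String)) → Option (List (String × String)) → Int → Option (List (String × String))
  | [], best, _ => best
  | c :: rest, best, bestScore =>
    let text := PySem.Str.lower (pvGetField c field)
    if PySem.Str.strip text = q then some c
    else
      let score := PySem.Set.len (PySem.Set.inter qtok (PySem.Set.ofList (PySem.Str.split₀ text)))
      if score > bestScore then pyBloop q qtok field rest (some c) score
      else pyBloop q qtok field rest best bestScore

def prefer_exact_py_alt (query : String) (candidates : List (List (String × String))) (field : String) : Option (List (String × String)) :=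
  let q := PySem.Str.strip (PySem.Str.lower query)
  pyBloop q (PySem.Set.ofList (PySem.Str.split₀ q)) field candidates none 0

-- ===== PRECONDITION & SPEC =====
def Spec_prefer_exact_py (query : String) (candidates : List (List (String × String))) (field : String) (out : Option (List (String × String))) : Prop := out = prefer_exact_py_alt query candidates field
instance (query : String) (candidates : List (List (String × String))) (field : String) (out : Option (List (String × String))) : Decidable (Spec_prefer_exact_py query candidates field out) := by unfold Spec_prefer_exact_py; infer_instance

-- ===== CLAIM (what is proved, stated in full; the proofs are below) =====
def Claim_equal_prefer_exact_py : Prop := ∀ (query : String) (candidates : List (List (String × String))) (field : String), Dom_prefer_exact_py query candidates field → Spec_prefer_exact_py query candidates field (prefer_exact_py query candidates field)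

-- ===== LEMMAS AND PROOFS =====

-- B's fused loop equals: A's exact scan, and on a miss A's fold from the current state.
lemma pyBloop_eq (q field : String) (cs : List (List (String × String))) :
    ∀ (best : Option (List (String × String))) (bestScore : Int),
      pyBloop q (PySem.Set.ofList (PySem.Str.split₀ q)) field cs best bestScore =
        match pyAexact q field cs with
        | some c => some c
        | none => (cs.foldl (pyAstep (PySem.Set.ofList (PySem.Str.split₀ q)) field) (best, bestScore)).1 := by
  induction cs with
  | nil => intro best bestScore; simp [pyBloop, pyAexact]
  | cons c rest ih =>
    intro best bestScore
    by_cases hq : PySem.Str.strip (PySem.Str.lower (pvGetField c field)) = q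
    · simp [pyBloop, pyAexact, hq]
    · by_cases hs : PySem.Set.len (PySem.Set.inter (PySem.Set.ofList (PySem.Str.split₀ q)) (PySem.Set.ofList (PySem.Str.split₀ (PySem.Str.lower (pvGetField c field))))) > bestScore
      · simp only [pyBloop, pyAexact, List.foldl, pyAstep, if_neg hq, if_pos hs]
        exact ih _ _
      · simp only [pyBloop, pyAexact, List.foldl, pyAstep, if_neg hq, if_neg hs]
        exact ih _ _

-- ===== VERDICT (by name: the statement is the Claim_ definition above) =====
theorem prefer_exact_py_spec : Claim_equal_prefer_exact_py := by
  intro query candidates field _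
  unfold Spec_prefer_exact_py prefer_exact_py prefer_exact_py_alt
  rw [pyBloop_eq]
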